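-- pv_equiv track=rewrite | github.com/Captainexpo-1/AdventOfCode2023 | days/day25/day21_2.py | get_all_supported_bricks
-- ===== SOURCE A (Python) =====
-- from collections import deque
--
-- def get_all_supported_bricks(start_idx, all_bricks, direct_supporters):
--     all_supported = set()
--     eval_queue = deque([start_idx])
--
--     while eval_queue:
--         current_idx = eval_queue.popleft()
--         for idx in direct_supporters[current_idx]:
--             if idx not in all_supported:
--                 all_supported.add(idx)
--                 eval_queue.append(idx)
--
--     return all_supported
-- ===== SOURCE B (Python) =====
-- def get_all_supported_bricks(start_idx, all_bricks, direct_supporters):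
--     # Iterate to a fixpoint: each round rescans every brick known so far and
--     # appends its not-yet-seen supporters; stop when a full round adds nothing.
--     result = []
--     while True:
--         added = False
--         for u in [start_idx] + result:
--             for v in direct_supporters[u]:
--                 if v not in result:
--                     result.append(v)
--                     added = True
--         if not added:
--             break
--     return set(result)
-- ===== Notes on version B (the rewrite author's own statement) =====
-- stated objective: alternative
-- what changed: The queue-driven BFS is replaced by round-based fixpoint iteration: each round rescans every brick known so far and appends its unseen supporters, stopping when a full pass adds nothing (no queue, no visited set).
-- outside the precondition, e.g. on get_all_supported_bricks(0, [], {0: [], 5: [7]}): A returns set(), B returns set()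
import Mathlib
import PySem

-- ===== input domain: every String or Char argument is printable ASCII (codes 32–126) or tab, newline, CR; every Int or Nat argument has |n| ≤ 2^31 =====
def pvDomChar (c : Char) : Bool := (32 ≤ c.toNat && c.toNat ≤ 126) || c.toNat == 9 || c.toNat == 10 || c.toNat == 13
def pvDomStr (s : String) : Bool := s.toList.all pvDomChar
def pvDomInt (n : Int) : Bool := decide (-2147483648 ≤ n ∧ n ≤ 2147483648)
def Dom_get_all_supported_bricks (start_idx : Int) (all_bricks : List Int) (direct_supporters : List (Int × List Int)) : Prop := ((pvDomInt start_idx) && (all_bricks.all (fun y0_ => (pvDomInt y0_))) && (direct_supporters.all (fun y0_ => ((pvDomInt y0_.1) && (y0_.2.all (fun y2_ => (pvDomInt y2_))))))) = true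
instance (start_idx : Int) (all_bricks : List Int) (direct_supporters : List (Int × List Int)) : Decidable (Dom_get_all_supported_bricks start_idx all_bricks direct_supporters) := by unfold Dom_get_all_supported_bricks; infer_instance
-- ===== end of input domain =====

-- B replaces A's queue-driven BFS by round-based fixpoint iteration (rescan all known
-- bricks each round, append unseen supporters, stop when a pass adds nothing);
-- objective: alternative (no queue, no visited set; same resulting set).


-- ===== PORT A =====
-- inner 'for idx in direct_supporters[current_idx]': updates the set and the queue together
def pvStepA (neigh : List Int) (sq : List Int × List Int) : List Int × List Int :=
  neigh.foldl (fun p idx => if idx ∈ p.1 then p else (p.1 ++ [idx], p.2 ++ [idx])) sq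

-- 'while eval_queue:' as fuel recursion; the fuel is a pure totality guard: the loop pops
-- once per fuel unit and the number of pops is at most 1 + (number of supporter entries),
-- so the supplied fuel never runs out on any input.
def pvLoopA (sup : List (Int × List Int)) : Nat → List Int → List Int → List Int
  | 0, s, _ => s
  | fuel + 1, s, q =>
    match q with
    | [] => s
    | c :: rest =>
      let p := pvStepA (PySem.Dict.getD ⟨sup⟩ c []) (s, rest)
      pvLoopA sup fuel p.1 p.2

def get_all_supported_bricks (start_idx : Int) (all_bricks : List Int) (direct_supporters : List (Int × List Int)) : List Int :=
  -- dict lookup direct_supporters[c]: getD is exact under Pre_ (every looked-up key present)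
  pvLoopA direct_supporters ((direct_supporters.flatMap Prod.snd).length + 1) [] [start_idx]

-- ===== PORT B =====
-- element step 'if v not in result: result.append(v)' on (result, added)
def pvPairEl (q : List Int × Bool) (v : Int) : List Int × Bool :=
  if v ∈ q.1 then q else (q.1 ++ [v], true)

-- one round: 'added = False; for u in [start_idx] + result: for v in direct_supporters[u]: …'
def pvRoundB (sup : List (Int × List Int)) (start : Int) (r : List Int) : List Int × Bool :=
  (start :: r).foldl (fun p u => (PySem.Dict.getD ⟨sup⟩ u []).foldl pvPairEl p) (r, false)

-- 'while True: … if not added: break' as fuel recursion; totality guard only: every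
-- continuing round grows the result, whose length is bounded by the supporter count.
def pvLoopF (sup : List (Int × List Int)) (start : Int) : Nat → List Int → List Int
  | 0, r => r
  | fuel + 1, r =>
    let p := pvRoundB sup start r
    if p.2 then pvLoopF sup start fuel p.1 else p.1

def get_all_supported_bricks_alt (start_idx : Int) (all_bricks : List Int) (direct_supporters : List (Int × List Int)) : List Int :=
  PySem.Set.ofList (pvLoopF direct_supporters start_idx ((direct_supporters.flatMap Prod.snd).length + 2) [])

-- ===== PRECONDITION & SPEC =====
-- Pre_ excludes inputs where a looked-up index is missing from the dict (Python KeyError) by the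
-- closed-form over-approximation "start_idx and every listed supporter value are keys"; this also
-- excludes some inputs on which A returns (a missing key that is never reached), since
-- reachability is not a closed-form condition.
def Pre_get_all_supported_bricks (start_idx : Int) (all_bricks : List Int) (direct_supporters : List (Int × List Int)) : Prop :=
  start_idx ∈ direct_supporters.map Prod.fst ∧
  ∀ p ∈ direct_supporters, ∀ v ∈ p.2, v ∈ direct_supporters.map Prod.fst
instance (start_idx : Int) (all_bricks : List Int) (direct_supporters : List (Int × List Int)) : Decidable (Pre_get_all_supported_bricks start_idx all_bricks direct_supporters) := by unfold Pre_get_all_supported_bricks; infer_instance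
def pvWitness_get_all_supported_bricks : Int × List Int × (List (Int × List Int)) := (0, [], [(0, [1]), (1, [0])])

def Spec_get_all_supported_bricks (start_idx : Int) (all_bricks : List Int) (direct_supporters : List (Int × List Int)) (out : List Int) : Prop := out = get_all_supported_bricks_alt start_idx all_bricks direct_supporters
instance (start_idx : Int) (all_bricks : List Int) (direct_supporters : List (Int × List Int)) (out : List Int) : Decidable (Spec_get_all_supported_bricks start_idx all_bricks direct_supporters out) := by unfold Spec_get_all_supported_bricks; infer_instance

-- ===== CLAIM (what is proved, stated in full; the proofs are below) =====
def Claim_equal_get_all_supported_bricks : Prop := ∀ (start_idx : Int) (all_bricks : List Int) (direct_supporters : List (Int × List Int)), Dom_get_all_supported_bricks start_idx all_bricks direct_supporters → Pre_get_all_supported_bricks start_idx all_bricks direct_supporters → Spec_get_all_supported_bricks start_idx all_bricks direct_supporters (get_all_supported_bricks start_idx all_bricks direct_supporters)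

-- ===== LEMMAS AND PROOFS =====

-- element op on the discovered list, and derived proof-side loop shapes
def pvEl (f : List Int) (v : Int) : List Int := if v ∈ f then f else f ++ [v]

def pvFoldEl (vs : List Int) (r : List Int) : List Int := vs.foldl pvEl r

def pvStep (sup : List (Int × List Int)) (u : Int) (r : List Int) : List Int :=
  pvFoldEl (PySem.Dict.getD ⟨sup⟩ u []) r

def pvScan (sup : List (Int × List Int)) (us : List Int) (r : List Int) : List Int :=
  us.foldl (fun r u => pvStep sup u r) r

-- the indexed worklist: an intermediate view shared by both proofs
def pvLoopI (sup : List (Int × List Int)) : Nat → List Int → Nat → Int → List Int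
  | 0, found, _, _ => found
  | fuel + 1, found, i, cur =>
    let found' := pvFoldEl (PySem.Dict.getD ⟨sup⟩ cur []) found
    if i = found'.length then found'
    else pvLoopI sup fuel found' (i + 1) (found'.getD i 0)

-- sequential scan from an index, reading the growing list itself
def pvJ (sup : List (Int × List Int)) : Nat → List Int → Nat → List Int
  | 0, s, _ => s
  | fuel + 1, s, i =>
    if i = s.length then s else pvJ sup fuel (pvStep sup (s.getD i 0) s) (i + 1)

def pvSat (sup : List (Int × List Int)) (u : Int) (r : List Int) : Prop :=
  ∀ v ∈ PySem.Dict.getD ⟨sup⟩ u [], v ∈ r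

-- ---- basic facts about pvFoldEl ----
theorem pvFoldEl_prefix (vs : List Int) : ∀ r, r <+: pvFoldEl vs r := by
  induction vs with
  | nil => intro r; exact List.prefix_refl r
  | cons v rest ih =>
    intro r
    simp only [pvFoldEl, List.foldl, pvEl] at *
    by_cases hv : v ∈ r
    · simpa [hv] using ih r
    · simp only [hv, if_false]
      exact List.IsPrefix.trans (List.prefix_append r [v]) (ih (r ++ [v]))

theorem pvFoldEl_subset {vs r : List Int} : ∀ x ∈ pvFoldEl vs r, x ∈ r ∨ x ∈ vs := by
  induction vs generalizing r with
  | nil => intro x hx; exact Or.inl hx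
  | cons v rest ih =>
    intro x hx
    simp only [pvFoldEl, List.foldl, pvEl] at hx
    by_cases hv : v ∈ r
    · rcases ih x (by simpa [hv] using hx) with h | h
      · exact Or.inl h
      · exact Or.inr (List.mem_cons_of_mem _ h)
    · rcases ih x (by simpa [hv] using hx) with h | h
      · rcases List.mem_append.1 h with h | h
        · exact Or.inl h
        · exact Or.inr (List.mem_cons.2 (Or.inl (List.mem_singleton.1 h)))
      · exact Or.inr (List.mem_cons_of_mem _ h)

theorem pvFoldEl_nodup (vs : List Int) : ∀ r : List Int, r.Nodup → (pvFoldEl vs r).Nodup := by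
  induction vs with
  | nil => intro r h; exact h
  | cons v rest ih =>
    intro r h
    simp only [pvFoldEl, List.foldl, pvEl] at *
    by_cases hv : v ∈ r
    · simpa [hv] using ih r h
    · simp only [hv, if_false]
      exact ih (r ++ [v]) (List.Nodup.append h (List.nodup_singleton v) (by simpa using hv))

theorem pvFoldEl_of_subset {vs r : List Int} (h : ∀ v ∈ vs, v ∈ r) : pvFoldEl vs r = r := by
  induction vs with
  | nil => rfl
  | cons v rest ih =>
    simp only [pvFoldEl, List.foldl, pvEl, h v (List.mem_cons_self), if_true]
    exact ih (fun v hv => h v (List.mem_cons_of_mem _ hv))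

theorem pvFoldEl_mem_of_mem (vs : List Int) : ∀ r, ∀ v ∈ vs, v ∈ pvFoldEl vs r := by
  induction vs with
  | nil => intro r v hv; cases hv
  | cons w rest ih =>
    intro r v hv
    simp only [pvFoldEl, List.foldl] at *
    rcases List.mem_cons.1 hv with rfl | hv
    · have : v ∈ pvEl r v := by
        by_cases h : v ∈ r
        · simpa [pvEl, h] using h
        · simp [pvEl, h]
      exact (pvFoldEl_prefix rest (pvEl r v)).subset this
    · exact ih (pvEl r w) v hv

-- ---- saturation ----
theorem pvSat_mono {sup : List (Int × List Int)} {u : Int} {r r' : List Int}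
    (h : pvSat sup u r) (hsub : ∀ x ∈ r, x ∈ r') : pvSat sup u r' :=
  fun v hv => hsub v (h v hv)

theorem pvStep_of_sat {sup : List (Int × List Int)} {u : Int} {r : List Int}
    (h : pvSat sup u r) : pvStep sup u r = r := pvFoldEl_of_subset h

theorem pvStep_sat_self (sup : List (Int × List Int)) (u : Int) (r : List Int) :
    pvSat sup u (pvStep sup u r) :=
  fun v hv => pvFoldEl_mem_of_mem _ r v hv

theorem pvScan_prefix (sup : List (Int × List Int)) (us : List Int) : ∀ r, r <+: pvScan sup us r := by
  induction us with
  | nil => intro r; exact List.prefix_refl r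
  | cons u rest ih =>
    intro r
    exact List.IsPrefix.trans (pvFoldEl_prefix _ r) (ih (pvStep sup u r))

theorem pvScan_sat_drop (sup : List (Int × List Int)) {us : List Int} (vs : List Int) (r : List Int)
    (h : ∀ u ∈ us, pvSat sup u r) : pvScan sup (us ++ vs) r = pvScan sup vs r := by
  induction us with
  | nil => rfl
  | cons u rest ih =>
    simp only [List.cons_append, pvScan, List.foldl] at *
    rw [show pvStep sup u r = r from pvStep_of_sat (h u List.mem_cons_self)]
    exact ih (fun u hu => h u (List.mem_cons_of_mem _ hu))

theorem pvScan_sat_post (sup : List (Int × List Int)) (us : List Int) :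
    ∀ r, ∀ u ∈ us, pvSat sup u (pvScan sup us r) := by
  induction us with
  | nil => intro r u hu; cases hu
  | cons w rest ih =>
    intro r u hu
    rcases List.mem_cons.1 hu with rfl | hu
    · exact pvSat_mono (pvStep_sat_self sup u r) (pvScan_prefix sup rest (pvStep sup u r)).subset
    · exact ih (pvStep sup w r) u hu

theorem pvScan_nodup (sup : List (Int × List Int)) (us : List Int) :
    ∀ r : List Int, r.Nodup → (pvScan sup us r).Nodup := by
  induction us with
  | nil => intro r h; exact h
  | cons u rest ih => intro r h; exact ih _ (pvFoldEl_nodup _ r h)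

-- ---- dict values live in flatMap Prod.snd ----
theorem pvGetD_subset (sup : List (Int × List Int)) (c : Int) :
    ∀ v ∈ PySem.Dict.getD ⟨sup⟩ c [], v ∈ sup.flatMap Prod.snd := by
  induction sup with
  | nil => intro v hv; simp [PySem.Dict.getD, PySem.Dict.get?] at hv
  | cons p rest ih =>
    intro v hv
    rw [PySem.Dict.getD_eq_get?_getD] at hv ih
    rw [PySem.Dict.get?_mk_cons] at hv
    by_cases h : p.1 == c
    · simp only [h, if_true, Option.getD_some] at hv
      exact List.mem_flatMap.2 ⟨p, List.mem_cons_self, hv⟩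
    · simp only [h, if_false] at hv
      have := ih v hv
      simp only [List.flatMap_cons, List.mem_append]
      exact Or.inr (by simpa using this)

theorem pvScan_subset (sup : List (Int × List Int)) (us : List Int) :
    ∀ r : List Int, (∀ x ∈ r, x ∈ sup.flatMap Prod.snd) →
      ∀ x ∈ pvScan sup us r, x ∈ sup.flatMap Prod.snd := by
  induction us with
  | nil => intro r h; exact h
  | cons u rest ih =>
    intro r h
    refine ih _ (fun x hx => ?_)
    rcases pvFoldEl_subset x hx with hx | hx
    · exact h x hx
    · exact pvGetD_subset sup u x hx

theorem pvLen_le (sup : List (Int × List Int)) {s : List Int} (hnd : s.Nodup)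
    (hsub : ∀ x ∈ s, x ∈ sup.flatMap Prod.snd) : s.length ≤ (sup.flatMap Prod.snd).length :=
  (List.subperm_of_subset hnd hsub).length_le

-- ---- A's loop = indexed worklist (bisimulation: the queue is the unscanned suffix) ----
theorem pvStep_pair (neigh : List Int) : ∀ (s : List Int) (i : Nat), i ≤ s.length →
    pvStepA neigh (s, s.drop i) = (pvFoldEl neigh s, (pvFoldEl neigh s).drop i) := by
  induction neigh with
  | nil => intro s i _; rfl
  | cons j rest ih =>
    intro s i hi
    simp only [pvStepA, pvFoldEl, List.foldl, pvEl] at *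
    by_cases hj : j ∈ s
    · simp only [hj, if_true]; exact ih s i hi
    · simp only [hj, if_false]
      rw [← List.drop_append_of_le_length hi]
      exact ih (s ++ [j]) i (by simp; omega)

theorem pvLoopA_nil (sup : List (Int × List Int)) : ∀ fuel s, pvLoopA sup fuel s [] = s := by
  intro fuel s; cases fuel <;> rfl

theorem pvLoop_eq (sup : List (Int × List Int)) : ∀ (fuel : Nat) (s : List Int) (i : Nat) (cur : Int),
    i ≤ s.length → pvLoopA sup fuel s (cur :: s.drop i) = pvLoopI sup fuel s i cur := by
  intro fuel
  induction fuel with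
  | zero => intro s i cur _; rfl
  | succ f ih =>
    intro s i cur hi
    simp only [pvLoopA, pvLoopI]
    rw [pvStep_pair _ s i hi]
    set s' := pvFoldEl (PySem.Dict.getD ⟨sup⟩ cur []) s with hs'
    have hle : s.length ≤ s'.length := (pvFoldEl_prefix _ s).length_le
    by_cases hstop : i = s'.length
    · simp only [hstop, if_true, List.drop_length]
      exact pvLoopA_nil sup f s'
    · have hlt : i < s'.length := by omega
      simp only [hstop, if_false]
      have hdrop : s'.drop i = s'.getD i 0 :: s'.drop (i + 1) := by
        rw [List.drop_eq_getElem_cons hlt, List.getD_eq_getElem s' 0 hlt]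
      rw [hdrop]
      exact ih s' (i + 1) (s'.getD i 0) (by omega)

-- ---- indexed worklist = pvJ ----
theorem pvLoopI_eq_pvJ (sup : List (Int × List Int)) :
    ∀ (f : Nat) (s : List Int) (i : Nat) (cur : Int), s.Nodup →
      (∀ x ∈ s, x ∈ sup.flatMap Prod.snd) → i ≤ s.length →
      (sup.flatMap Prod.snd).length + 1 ≤ f + i →
      pvLoopI sup f s i cur = pvJ sup f (pvStep sup cur s) i := by
  intro f
  induction f with
  | zero =>
    intro s i cur hnd hsub hi hf
    exact absurd (le_trans hi (pvLen_le sup hnd hsub)) (by omega)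
  | succ f ih =>
    intro s i cur hnd hsub hi hf
    have hdef : pvFoldEl (PySem.Dict.getD ⟨sup⟩ cur []) s = pvStep sup cur s := rfl
    simp only [pvLoopI, pvJ, hdef]
    set s' := pvStep sup cur s with hs'
    have hle : s.length ≤ s'.length := (pvFoldEl_prefix _ s).length_le
    by_cases hstop : i = s'.length
    · simp [hstop]
    · simp only [hstop, if_false]
      have hnd' : s'.Nodup := pvFoldEl_nodup _ s hnd
      have hsub' : ∀ x ∈ s', x ∈ sup.flatMap Prod.snd := by
        intro x hx
        rcases pvFoldEl_subset x hx with h | h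
        · exact hsub x h
        · exact pvGetD_subset sup cur x h
      exact ih s' (i + 1) (s'.getD i 0) hnd' hsub' (by omega) (by omega)

-- ---- pvJ segment and stop lemmas ----
theorem pvJ_stop (sup : List (Int × List Int)) (f : Nat) (s : List Int) :
    pvJ sup f s s.length = s := by cases f <;> simp [pvJ]

theorem pvJ_seg (sup : List (Int × List Int)) :
    ∀ (us : List Int) (f : Nat) (s : List Int) (i : Nat),
      us <+: s.drop i → i + us.length ≤ s.length → us.length ≤ f →
      pvJ sup f s i = pvJ sup (f - us.length) (pvScan sup us s) (i + us.length) := by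
  intro us
  induction us with
  | nil => intro f s i _ _ _; simp [pvScan]
  | cons v rest ih =>
    intro f s i hpre hlen hf
    obtain ⟨w, hw⟩ := hpre
    have hi : i < s.length := by simp at hlen; omega
    obtain ⟨f', rfl⟩ : ∃ f', f = f' + 1 := ⟨f - 1, by simp at hf; omega⟩
    have hget : s.getD i 0 = v := by
      have h0 : s[i] = (s.drop i)[0]'(by simp [hi]) := by simp
      rw [List.getD_eq_getElem s 0 hi, h0]
      simp [← hw]
    simp only [pvJ, Nat.ne_of_lt hi, if_false, hget]
    set s' := pvStep sup v s with hs'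
    have hpre' : s <+: s' := pvFoldEl_prefix _ s
    obtain ⟨t, ht⟩ := hpre'
    have hdrop' : s'.drop (i + 1) = s.drop (i + 1) ++ t := by
      rw [← ht, List.drop_append_of_le_length (by omega)]
    have hrest : rest <+: s'.drop (i + 1) := by
      rw [hdrop']
      have : s.drop (i + 1) = rest ++ w := by
        have := congrArg List.tail hw
        simpa [List.drop_drop] using this.symm
      rw [this]
      exact ⟨w ++ t, by simp⟩
    have hlen' : (i + 1) + rest.length ≤ s'.length := by
      have h1 : s.length ≤ s'.length := by rw [← ht]; simp
      simp at hlen; omega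
    have := ih f' s' (i + 1) hrest hlen' (by simp at hf; omega)
    rw [this]
    have harith : i + 1 + rest.length = i + (v :: rest).length := by simp; omega
    have hfuel : f' - rest.length = f' + 1 - (v :: rest).length := by simp
    rw [harith, hfuel]
    rfl

-- ---- the round of B, flattened ----
theorem pvPair_flat : ∀ (vs : List Int) (r : List Int) (a : Bool),
    vs.foldl pvPairEl (r, a) = (pvFoldEl vs r, a || decide (r ≠ pvFoldEl vs r)) := by
  intro vs
  induction vs with
  | nil => intro r a; simp [pvFoldEl]
  | cons v rest ih =>
    intro r a
    simp only [List.foldl, pvPairEl, pvFoldEl, pvEl]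
    by_cases hv : v ∈ r
    · simpa [hv] using ih r a
    · simp only [hv, if_false]
      rw [ih (r ++ [v]) true]
      have hne : r ≠ pvFoldEl rest (r ++ [v]) := by
        intro h
        have h1 : (r ++ [v]).length ≤ (pvFoldEl rest (r ++ [v])).length :=
          (pvFoldEl_prefix _ _).length_le
        rw [← h] at h1; simp at h1
      have hne' : r ≠ List.foldl pvEl (r ++ [v]) rest := by simpa [pvFoldEl] using hne
      simp [pvFoldEl, hne']

theorem pvFold_flat (sup : List (Int × List Int)) :
    ∀ (us : List Int) (p : List Int × Bool),
      us.foldl (fun p u => (PySem.Dict.getD ⟨sup⟩ u []).foldl pvPairEl p) p =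
        (us.flatMap (fun u => PySem.Dict.getD ⟨sup⟩ u [])).foldl pvPairEl p := by
  intro us
  induction us with
  | nil => intro p; rfl
  | cons u rest ih =>
    intro p
    simp only [List.foldl, List.flatMap_cons, List.foldl_append]
    exact ih _

theorem pvScan_flat (sup : List (Int × List Int)) :
    ∀ (us : List Int) (r : List Int),
      pvScan sup us r = pvFoldEl (us.flatMap (fun u => PySem.Dict.getD ⟨sup⟩ u [])) r := by
  intro us
  induction us with
  | nil => intro r; rfl
  | cons u rest ih =>
    intro r
    simp only [pvScan, List.foldl, List.flatMap_cons, pvFoldEl, List.foldl_append] at *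
    exact ih _

theorem pvRoundB_eq (sup : List (Int × List Int)) (start : Int) (r : List Int) :
    pvRoundB sup start r =
      (pvScan sup (start :: r) r, decide (r ≠ pvScan sup (start :: r) r)) := by
  rw [pvRoundB, pvFold_flat, pvPair_flat, pvScan_flat]
  simp

-- ---- B's fixpoint loop = pvJ ----
theorem pvLoopF_eq_pvJ (sup : List (Int × List Int)) (start : Int) :
    ∀ (fF : Nat) (r : List Int) (m : Nat), r.Nodup →
      (∀ x ∈ r, x ∈ sup.flatMap Prod.snd) →
      pvSat sup start r → (∀ u ∈ r.take m, pvSat sup u r) → m ≤ r.length →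
      (sup.flatMap Prod.snd).length + 1 ≤ fF + m →
      pvLoopF sup start fF r = pvJ sup ((sup.flatMap Prod.snd).length + 1 - m) r m := by
  intro fF
  induction fF with
  | zero =>
    intro r m hnd hsub hsat hsatm hm hf
    exact absurd (le_trans hm (pvLen_le sup hnd hsub)) (by omega)
  | succ fF ih =>
    intro r m hnd hsub hsat hsatm hm hf
    have hsatall : ∀ u ∈ start :: r.take m, pvSat sup u r := by
      intro u hu
      rcases List.mem_cons.1 hu with rfl | hu
      · exact hsat
      · exact hsatm u hu
    have hE2 : r.length ≤ (sup.flatMap Prod.snd).length := pvLen_le sup hnd hsub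
    have hsplit : pvScan sup (start :: r) r = pvScan sup (r.drop m) r := by
      have : start :: r = (start :: r.take m) ++ r.drop m := by
        simp [List.take_append_drop]
      rw [this]
      exact pvScan_sat_drop sup (r.drop m) r hsatall
    set r' := pvScan sup (start :: r) r with hr'
    have hpre : r <+: r' := pvScan_prefix sup _ r
    have hseg : pvJ sup ((sup.flatMap Prod.snd).length + 1 - m) r m =
        pvJ sup ((sup.flatMap Prod.snd).length + 1 - r.length) r' r.length := by
      have hs := pvJ_seg sup (r.drop m) ((sup.flatMap Prod.snd).length + 1 - m) r m
        (List.prefix_refl _) (by simp only [List.length_drop]; omega)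
        (by simp only [List.length_drop]; omega)
      rw [hs, ← hsplit]
      have h1 : m + (r.drop m).length = r.length := by simp only [List.length_drop]; omega
      have h2 : (sup.flatMap Prod.snd).length + 1 - m - (r.drop m).length =
          (sup.flatMap Prod.snd).length + 1 - r.length := by simp only [List.length_drop]; omega
      rw [h1, h2]
    simp only [pvLoopF, pvRoundB_eq sup start r, ← hr']
    by_cases heq : r = r'
    · simp only [heq, ne_eq, not_true_eq_false, decide_false, Bool.false_eq_true, if_false]
      rw [← heq, hseg, ← heq, pvJ_stop]
    · simp only [ne_eq, heq, not_false_eq_true, decide_true, if_true]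
      have hmlt : m < r.length := by
        by_contra h
        have hnil : r.drop m = [] := List.drop_eq_nil_of_le (by omega)
        rw [hsplit, hnil] at hr'
        exact heq hr'
      have hnd' : r'.Nodup := pvScan_nodup sup _ r hnd
      have hsub' : ∀ x ∈ r', x ∈ sup.flatMap Prod.snd := pvScan_subset sup _ r hsub
      have hsat' : pvSat sup start r' := by
        have h1 : pvSat sup start (pvStep sup start r) := pvStep_sat_self sup start r
        exact pvSat_mono h1 (List.IsPrefix.subset (pvScan_prefix sup r (pvStep sup start r)))
      have hsatm' : ∀ u ∈ r'.take r.length, pvSat sup u r' := by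
        intro u hu
        obtain ⟨t, ht⟩ : ∃ t, r ++ t = r' := hpre
        rw [← ht, List.take_left] at hu
        rcases (List.mem_append.1 (by rw [← List.take_append_drop m r] at hu; exact hu)) with h | h
        · exact pvSat_mono (hsatm u h) (List.IsPrefix.subset ⟨t, ht⟩)
        · rw [hsplit]
          exact pvScan_sat_post sup (r.drop m) r u h
      have hlt : r.length < r'.length := by
        rcases Nat.lt_or_ge r.length r'.length with h | h
        · exact h
        · exfalso
          obtain ⟨t, ht⟩ : ∃ t, r ++ t = r' := hpre
          have htnil : t = [] := by
            have hlen := congrArg List.length ht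
            simp at hlen
            cases t with
            | nil => rfl
            | cons a b => simp at hlen; omega
          rw [htnil] at ht; simp at ht
          exact heq ht
      rw [hseg]
      exact ih r' r.length hnd' hsub' hsat' hsatm' (by omega) (by omega)

-- ---- nodup of the final list (for set(result) = result) ----
theorem pvJ_nodup (sup : List (Int × List Int)) :
    ∀ (f : Nat) (s : List Int) (i : Nat), s.Nodup → (pvJ sup f s i).Nodup := by
  intro f
  induction f with
  | zero => intro s i h; exact h
  | succ f ih =>
    intro s i h
    simp only [pvJ]
    by_cases hstop : i = s.length
    · simpa [hstop] using h
    · simp only [hstop, if_false]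
      exact ih _ _ (pvFoldEl_nodup _ s h)

-- ===== VERDICT (by name: the statement is the Claim_ definition above) =====
theorem get_all_supported_bricks_spec : Claim_equal_get_all_supported_bricks := by
  intro start all_bricks sup _ _
  unfold Spec_get_all_supported_bricks get_all_supported_bricks get_all_supported_bricks_alt
  set E := (sup.flatMap Prod.snd).length with hE
  -- A side: BFS = indexed worklist = pvJ from the first expansion
  have hA : pvLoopA sup (E + 1) [] [start] = pvJ sup (E + 1) (pvStep sup start []) 0 := by
    have h1 : pvLoopA sup (E + 1) [] [start] = pvLoopI sup (E + 1) [] 0 start := by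
      have := pvLoop_eq sup (E + 1) [] 0 start (by simp)
      simpa using this
    rw [h1]
    exact pvLoopI_eq_pvJ sup (E + 1) [] 0 start List.nodup_nil (by simp) (by simp) (by omega)
  -- B side: unroll the first round of the fixpoint loop
  set s0 := pvStep sup start [] with hs0
  have hround : pvRoundB sup start [] = (s0, decide (([] : List Int) ≠ s0)) := by
    rw [pvRoundB_eq]
    rfl
  have hB : pvLoopF sup start (E + 2) [] = pvJ sup (E + 1) s0 0 := by
    have hunfold : pvLoopF sup start (E + 2) [] =
        if (pvRoundB sup start []).2 then pvLoopF sup start (E + 1) (pvRoundB sup start []).1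
        else (pvRoundB sup start []).1 := rfl
    rw [hunfold, hround]
    by_cases h0 : ([] : List Int) = s0
    · simp only [← h0, ne_eq, not_true_eq_false, decide_false, Bool.false_eq_true, if_false]
      exact (pvJ_stop sup (E + 1) []).symm
    · simp only [ne_eq, h0, not_false_eq_true, decide_true, if_true]
      have hnd0 : s0.Nodup := pvFoldEl_nodup _ [] List.nodup_nil
      have hsub0 : ∀ x ∈ s0, x ∈ sup.flatMap Prod.snd := by
        intro x hx
        rcases pvFoldEl_subset x hx with h | h
        · cases h
        · exact pvGetD_subset sup start x h
      have h2 := pvLoopF_eq_pvJ sup start (E + 1) s0 0 hnd0 hsub0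
        (pvStep_sat_self sup start []) (by simp) (by simp) (by omega)
      rw [Nat.sub_zero] at h2
      exact h2
  rw [hA, hB]
  exact (PySem.Set.ofList_eq_self_of_nodup _ (pvJ_nodup sup (E + 1) s0 0
    (pvFoldEl_nodup _ [] List.nodup_nil))).symm
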